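-- pv_equiv track=rewrite | github.com/LeitnerBua/Project-Euler | p7_10001st_prime.py | power_of_two
-- ===== SOURCE A (Python) =====
-- def power_of_two(n1):
--     exp = 1
--     while exp <= 512:
--         for j in range(100000):
--             t = j * (2**exp)
--             if n1 == t:
--                return j, exp
--         exp *= 2
-- ===== SOURCE B (Python) =====
-- def power_of_two(n1):
--     exp = 1
--     while exp <= 512:
--         p = 1 << exp
--         q, r = divmod(n1, p)
--         if r == 0 and 0 <= q < 100000:
--             return q, exp
--         exp *= 2
-- ===== Notes on version B (the rewrite author's own statement) =====
-- stated objective: faster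
-- what changed: Instead of scanning every candidate multiplier j for each exponent, B computes one divmod of the input by the power per exponent and checks the quotient's range directly, eliminating the inner loop.
import Mathlib
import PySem

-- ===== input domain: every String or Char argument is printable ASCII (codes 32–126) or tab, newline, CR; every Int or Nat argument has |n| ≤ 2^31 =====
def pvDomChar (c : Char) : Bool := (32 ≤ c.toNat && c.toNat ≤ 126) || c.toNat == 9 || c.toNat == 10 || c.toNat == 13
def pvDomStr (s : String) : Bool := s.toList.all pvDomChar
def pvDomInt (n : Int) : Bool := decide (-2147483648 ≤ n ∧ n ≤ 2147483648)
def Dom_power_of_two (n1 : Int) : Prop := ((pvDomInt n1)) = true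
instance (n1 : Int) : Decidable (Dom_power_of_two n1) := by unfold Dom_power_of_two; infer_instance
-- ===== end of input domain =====

-- B replaces A's inner scan of 100000 candidate multipliers by one divmod per exponent (objective: faster).

-- ===== PORT A =====
-- inner 'for j in range(100000): if n1 == j * 2**exp: return j, exp'
def power_of_two_innerA (n1 exp : Int) : List Int → Option (Int × Int)
  | [] => none
  | j :: rest =>
    if n1 = j * (2 : Int) ^ exp.toNat then some (j, exp)
    else power_of_two_innerA n1 exp rest

-- outer 'while exp <= 512: … exp *= 2'; fuel 16 > the 10 doublings needed from exp = 1
def power_of_two_loopA (n1 : Int) : Nat → Int → Option (Int × Int)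
  | 0, _ => none
  | fuel + 1, exp =>
    if exp ≤ 512 then
      match power_of_two_innerA n1 exp (PySem.List.pyRange 0 100000 1) with
      | some r => some r
      | none => power_of_two_loopA n1 fuel (exp * 2)
    else none

def power_of_two (n1 : Int) : Option (Int × Int) := power_of_two_loopA n1 16 1

-- ===== PORT B =====
-- 'q, r = divmod(n1, p)' with p = 1 << exp > 0: PySem.Int.floordiv / mod (exact for p ≠ 0)
def power_of_two_loopB (n1 : Int) : Nat → Int → Option (Int × Int)
  | 0, _ => none
  | fuel + 1, exp =>
    if exp ≤ 512 then
      let p : Int := (2 : Int) ^ exp.toNat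
      let q := PySem.Int.floordiv n1 p
      let r := PySem.Int.mod n1 p
      if r = 0 ∧ 0 ≤ q ∧ q < 100000 then some (q, exp)
      else power_of_two_loopB n1 fuel (exp * 2)
    else none

def power_of_two_alt (n1 : Int) : Option (Int × Int) := power_of_two_loopB n1 16 1

-- ===== PRECONDITION & SPEC =====
def Spec_power_of_two (n1 : Int) (out : Option (Int × Int)) : Prop := out = power_of_two_alt n1
instance (n1 : Int) (out : Option (Int × Int)) : Decidable (Spec_power_of_two n1 out) := by unfold Spec_power_of_two; infer_instance

-- ===== CLAIM (what is proved, stated in full; the proofs are below) =====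
def Claim_equal_power_of_two : Prop := ∀ (n1 : Int), Dom_power_of_two n1 → Spec_power_of_two n1 (power_of_two n1)

-- ===== LEMMAS AND PROOFS =====

-- A's inner scan finds j with n1 = j * p iff p divides n1 and the quotient lies in the scanned list.
theorem innerA_char (n1 exp : Int) (L : List Int) :
    power_of_two_innerA n1 exp L =
      if n1 % ((2 : Int) ^ exp.toNat) = 0 ∧ n1 / ((2 : Int) ^ exp.toNat) ∈ L
      then some (n1 / ((2 : Int) ^ exp.toNat), exp) else none := by
  induction L with
  | nil => simp [power_of_two_innerA]
  | cons j rest ih =>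
    have hp : (0 : Int) < (2 : Int) ^ exp.toNat := by positivity
    by_cases h : n1 = j * (2 : Int) ^ exp.toNat
    · have hq : n1 / ((2 : Int) ^ exp.toNat) = j := by
        rw [h]; exact Int.mul_ediv_cancel _ (by omega)
      have hm : n1 % ((2 : Int) ^ exp.toNat) = 0 := by
        rw [h]; exact Int.mul_emod_left _ _
      simp [power_of_two_innerA, h, hq, hm]
    · have hmem : (n1 % ((2 : Int) ^ exp.toNat) = 0 ∧ n1 / ((2 : Int) ^ exp.toNat) ∈ j :: rest)
          ↔ (n1 % ((2 : Int) ^ exp.toNat) = 0 ∧ n1 / ((2 : Int) ^ exp.toNat) ∈ rest) := by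
        constructor
        · rintro ⟨hm, hmem⟩
          refine ⟨hm, ?_⟩
          rcases List.mem_cons.mp hmem with hj | hr
          · exfalso; apply h
            have := Int.ediv_mul_cancel (Int.dvd_of_emod_eq_zero hm)
            rw [hj] at this; omega
          · exact hr
        · rintro ⟨hm, hr⟩; exact ⟨hm, List.mem_cons_of_mem _ hr⟩
      rw [power_of_two_innerA, if_neg h, ih, if_congr hmem rfl rfl]

theorem loop_eq (n1 : Int) : ∀ (fuel : Nat) (exp : Int),
    power_of_two_loopA n1 fuel exp = power_of_two_loopB n1 fuel exp := by
  intro fuel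
  induction fuel with
  | zero => intro exp; rfl
  | succ k ih =>
    intro exp
    have hp : (0 : Int) < (2 : Int) ^ exp.toNat := by positivity
    rw [power_of_two_loopA, power_of_two_loopB]
    by_cases hexp : exp ≤ 512
    · rw [if_pos hexp, if_pos hexp, innerA_char]
      by_cases hc : n1 % ((2 : Int) ^ exp.toNat) = 0 ∧
          0 ≤ n1 / ((2 : Int) ^ exp.toNat) ∧ n1 / ((2 : Int) ^ exp.toNat) < 100000
      · simp [PySem.List.mem_pyRange_one, PySem.Int.floordiv_eq_ediv_of_pos hp,
          PySem.Int.mod_eq_emod_of_pos hp, hc.1, hc.2.1, hc.2.2]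
      · have hc' : ¬ (n1 % ((2 : Int) ^ exp.toNat) = 0 ∧
            n1 / ((2 : Int) ^ exp.toNat) ∈ PySem.List.pyRange 0 100000 1) := by
          simp only [PySem.List.mem_pyRange_one]; tauto
        simp only [if_neg hc', PySem.Int.floordiv_eq_ediv_of_pos hp,
          PySem.Int.mod_eq_emod_of_pos hp, if_neg hc]
        exact ih _
    · rw [if_neg hexp, if_neg hexp]

-- ===== VERDICT (by name: the statement is the Claim_ definition above) =====
theorem power_of_two_spec : Claim_equal_power_of_two := by
  intro n1 _
  show power_of_two n1 = power_of_two_alt n1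
  exact loop_eq n1 16 1
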